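-- pv_equiv track=rewrite | github.com/UW-Advanced-Robotics-Lab/pytorch-simple-affnet | dataset/utils/UMD/umd_utils.py | object_id_to_aff_id
-- ===== SOURCE A (Python) =====
-- def object_id_to_aff_id(object_ids):
--     aff_ids = []
--     for i in range(len(object_ids)):
--         object_id = object_ids[i]
--         if object_id == 0:  # "bowl"
--             aff_ids.append([0])
--         elif object_id == 1:  # "bowl"
--             aff_ids.append([4])
--         elif object_id == 2:  # "cup"
--             aff_ids.append([4, 7])
--         elif object_id == 3:  # "hammer"
--             aff_ids.append([1, 5])
--         elif object_id == 4:  # "knife"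
--             aff_ids.append([1, 2])
--         elif object_id == 5:  # "ladle"
--             aff_ids.append([1, 4])
--         elif object_id == 6:  # "mallet"
--             aff_ids.append([1, 5])
--         elif object_id == 7:  # "mug"
--             aff_ids.append([1, 4, 7])
--         elif object_id == 8:  # "pot"
--             aff_ids.append([4, 7])
--         elif object_id == 9:  # "saw"
--             aff_ids.append([1, 2])
--         elif object_id == 10:  # "scissors"
--             aff_ids.append([1, 2])
--         elif object_id == 11:  # "scoop"
--             aff_ids.append([1, 3])
--         elif object_id == 12:  # "shears"
--             aff_ids.append([1, 2])
--         elif object_id == 13:  # "shovel"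
--             aff_ids.append([1, 3])
--         elif object_id == 14:  # "spoon"
--             aff_ids.append([1, 3])
--         elif object_id == 15:  # "tenderizer"
--             aff_ids.append([1, 5])
--         elif object_id == 16:  # "trowel"
--             aff_ids.append([1, 3])
--         elif object_id == 17:  # "turner"
--             aff_ids.append([1, 6])
--         else:
--             assert (" --- Object does not exist in UMD dataset --- ")
--     return aff_ids
-- ===== SOURCE B (Python) =====
-- # Bit-packed affordance table: MASKS[oid] has bit k set iff affordance k applies.
-- MASKS = [1, 16, 144, 34, 6, 18, 34, 146, 144, 6, 6, 10, 6, 10, 10, 34, 10, 66]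
--
-- def object_id_to_aff_id(object_ids):
--     out = []
--     for oid in object_ids:
--         if 0 <= oid < 18:
--             m = MASKS[oid]
--             ids = []
--             k = 0
--             while m:
--                 if m & 1:
--                     ids.append(k)
--                 m >>= 1
--                 k += 1
--             out.append(ids)
--     return out
-- ===== Notes on version B (the rewrite author's own statement) =====
-- stated objective: alternative
-- what changed: Replaces the 18-branch if/elif chain over explicit lists by a bit-packed table of integer masks (bit k set = affordance k); each returned list is reconstructed by decoding the mask's set bits in a while loop, and unknown ids are skipped by a range check.
import Mathlib
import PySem

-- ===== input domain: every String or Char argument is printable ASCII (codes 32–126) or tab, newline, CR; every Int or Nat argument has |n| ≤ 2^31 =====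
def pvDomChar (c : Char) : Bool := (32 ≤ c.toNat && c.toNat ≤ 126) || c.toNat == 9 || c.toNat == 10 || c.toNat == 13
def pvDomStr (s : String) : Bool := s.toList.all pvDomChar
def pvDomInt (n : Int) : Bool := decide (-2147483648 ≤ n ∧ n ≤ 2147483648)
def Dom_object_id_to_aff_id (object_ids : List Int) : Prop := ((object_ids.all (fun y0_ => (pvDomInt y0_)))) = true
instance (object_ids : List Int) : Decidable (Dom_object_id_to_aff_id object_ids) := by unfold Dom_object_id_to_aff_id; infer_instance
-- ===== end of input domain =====

-- B stores the table as bit-packed integer masks and decodes each mask's set bits with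
-- a loop (alternative representation; same return value, unknown ids silently skipped).

-- ===== PORT A =====
-- A's loop body: the if/elif chain, one step of the loop.
def pvStepA (aff_ids : List (List Int)) (object_id : Int) : List (List Int) :=
  if object_id == 0 then aff_ids ++ [[0]]
  else if object_id == 1 then aff_ids ++ [[4]]
  else if object_id == 2 then aff_ids ++ [[4, 7]]
  else if object_id == 3 then aff_ids ++ [[1, 5]]
  else if object_id == 4 then aff_ids ++ [[1, 2]]
  else if object_id == 5 then aff_ids ++ [[1, 4]]
  else if object_id == 6 then aff_ids ++ [[1, 5]]
  else if object_id == 7 then aff_ids ++ [[1, 4, 7]]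
  else if object_id == 8 then aff_ids ++ [[4, 7]]
  else if object_id == 9 then aff_ids ++ [[1, 2]]
  else if object_id == 10 then aff_ids ++ [[1, 2]]
  else if object_id == 11 then aff_ids ++ [[1, 3]]
  else if object_id == 12 then aff_ids ++ [[1, 2]]
  else if object_id == 13 then aff_ids ++ [[1, 3]]
  else if object_id == 14 then aff_ids ++ [[1, 3]]
  else if object_id == 15 then aff_ids ++ [[1, 5]]
  else if object_id == 16 then aff_ids ++ [[1, 3]]
  else if object_id == 17 then aff_ids ++ [[1, 6]]
  else aff_ids  -- assert of a truthy string: no-op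

def object_id_to_aff_id (object_ids : List Int) : List (List Int) :=
  (PySem.List.pyRange 0 (object_ids.length : Int) 1).foldl
    (fun aff_ids i => pvStepA aff_ids (PySem.List.pyGetD object_ids i 0))
    []

-- ===== PORT B =====
-- the bit-packed table MASKS
def pvMASKS : List Nat := [1, 16, 144, 34, 6, 18, 34, 146, 144, 6, 6, 10, 6, 10, 10, 34, 10, 66]

-- B's while loop decoding the set bits of m (first fuel argument = m itself: the loop
-- halves m each iteration, so m iterations always suffice; exact for every m).
def pvDecodeAux : Nat → Nat → Int → List Int
  | 0, _, _ => []
  | fuel + 1, m, k =>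
    if m = 0 then []
    else (if m % 2 = 1 then [k] else []) ++ pvDecodeAux fuel (m / 2) (k + 1)

def pvDecode (m : Nat) (k : Int) : List Int := pvDecodeAux m m k

-- B's loop body: range check, mask lookup (in range by the guard, so getD is exact), decode.
def pvStepB (out : List (List Int)) (oid : Int) : List (List Int) :=
  if 0 ≤ oid ∧ oid < 18 then out ++ [pvDecode (pvMASKS.getD oid.toNat 0) 0]
  else out

def object_id_to_aff_id_alt (object_ids : List Int) : List (List Int) :=
  object_ids.foldl pvStepB []

-- ===== PRECONDITION & SPEC =====
def Spec_object_id_to_aff_id (object_ids : List Int) (out : List (List Int)) : Prop := out = object_id_to_aff_id_alt object_ids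
instance (object_ids : List Int) (out : List (List Int)) : Decidable (Spec_object_id_to_aff_id object_ids out) := by unfold Spec_object_id_to_aff_id; infer_instance

-- ===== CLAIM =====
def Claim_equal_object_id_to_aff_id : Prop := ∀ (object_ids : List Int), Dom_object_id_to_aff_id object_ids → Spec_object_id_to_aff_id object_ids (object_id_to_aff_id object_ids)

-- ===== LEMMAS AND PROOFS =====

-- A's per-element branch chain and B's per-element mask decode append the same list.
set_option maxHeartbeats 1000000 in
lemma pvStep_eq (acc : List (List Int)) (x : Int) : pvStepA acc x = pvStepB acc x := by
  by_cases h0 : x = 0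
  · subst h0; simp [pvStepA, pvStepB]; decide
  by_cases h1 : x = 1
  · subst h1; simp [pvStepA, pvStepB]; decide
  by_cases h2 : x = 2
  · subst h2; simp [pvStepA, pvStepB]; decide
  by_cases h3 : x = 3
  · subst h3; simp [pvStepA, pvStepB]; decide
  by_cases h4 : x = 4
  · subst h4; simp [pvStepA, pvStepB]; decide
  by_cases h5 : x = 5
  · subst h5; simp [pvStepA, pvStepB]; decide
  by_cases h6 : x = 6
  · subst h6; simp [pvStepA, pvStepB]; decide
  by_cases h7 : x = 7
  · subst h7; simp [pvStepA, pvStepB]; decide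
  by_cases h8 : x = 8
  · subst h8; simp [pvStepA, pvStepB]; decide
  by_cases h9 : x = 9
  · subst h9; simp [pvStepA, pvStepB]; decide
  by_cases h10 : x = 10
  · subst h10; simp [pvStepA, pvStepB]; decide
  by_cases h11 : x = 11
  · subst h11; simp [pvStepA, pvStepB]; decide
  by_cases h12 : x = 12
  · subst h12; simp [pvStepA, pvStepB]; decide
  by_cases h13 : x = 13
  · subst h13; simp [pvStepA, pvStepB]; decide
  by_cases h14 : x = 14
  · subst h14; simp [pvStepA, pvStepB]; decide
  by_cases h15 : x = 15
  · subst h15; simp [pvStepA, pvStepB]; decide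
  by_cases h16 : x = 16
  · subst h16; simp [pvStepA, pvStepB]; decide
  by_cases h17 : x = 17
  · subst h17; simp [pvStepA, pvStepB]; decide
  · have hg : ¬ (0 ≤ x ∧ x < 18) := by omega
    simp [pvStepA, pvStepB, h0, h1, h2, h3, h4, h5, h6, h7, h8, h9,
          h10, h11, h12, h13, h14, h15, h16, h17, hg]

-- ===== VERDICT =====
theorem object_id_to_aff_id_spec : Claim_equal_object_id_to_aff_id := by
  intro object_ids _
  unfold Spec_object_id_to_aff_id object_id_to_aff_id object_id_to_aff_id_alt
  rw [PySem.List.foldl_pyRange_zero_pyGetD' object_ids 0 pvStepA []]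
  exact PySem.List.foldl_congr_mem object_ids pvStepA pvStepB []
    (fun acc x _ => pvStep_eq acc x)
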